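-- pv_equiv track=rewrite | github.com/deanmoses/the_flip | the_flip/apps/maintenance/management/commands/import_maintenance_records.py | split_maintainer_names
-- ===== SOURCE A (Python) =====
-- def split_maintainer_names(raw: str) -> list[str]:
--     if not raw:
--         return []
--     names = []
--     parts = raw.split(",")
--     for part in parts:
--         subparts = part.split(" and ")
--         for name in subparts:
--             cleaned = name.strip()
--             if cleaned:
--                 names.append(cleaned)
--     return names
-- ===== SOURCE B (Python) =====
-- def split_maintainer_names(raw: str) -> list[str]:
--     # single left-to-right scan recognizing both delimiters in one pass
--     names = []
--     buf = []
--     i, n = 0, len(raw)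
--     while i < n:
--         if raw[i] == ",":
--             name = "".join(buf).strip()
--             if name:
--                 names.append(name)
--             buf = []
--             i += 1
--         elif raw.startswith(" and ", i):
--             name = "".join(buf).strip()
--             if name:
--                 names.append(name)
--             buf = []
--             i += 5
--         else:
--             buf.append(raw[i])
--             i += 1
--     name = "".join(buf).strip()
--     if name:
--         names.append(name)
--     return names
-- ===== Notes on version B (the rewrite author's own statement) =====
-- stated objective: alternative
-- what changed: Replaces A's nested comma-split then ' and '-split passes with a single left-to-right character scan that recognizes both delimiters in one pass and flushes stripped non-empty tokens as it goes.
import Mathlib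
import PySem

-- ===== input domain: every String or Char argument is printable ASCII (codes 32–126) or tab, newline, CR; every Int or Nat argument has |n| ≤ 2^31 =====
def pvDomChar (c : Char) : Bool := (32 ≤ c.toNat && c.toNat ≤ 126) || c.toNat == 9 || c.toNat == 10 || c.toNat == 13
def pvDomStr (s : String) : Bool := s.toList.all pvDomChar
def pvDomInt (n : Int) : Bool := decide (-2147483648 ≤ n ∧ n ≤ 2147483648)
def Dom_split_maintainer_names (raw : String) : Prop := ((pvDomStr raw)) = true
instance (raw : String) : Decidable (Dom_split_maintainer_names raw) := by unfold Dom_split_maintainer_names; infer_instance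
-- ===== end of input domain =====

-- B replaces A's nested comma-split then " and "-split passes with a single left-to-right
-- scan recognizing both delimiters in one pass; same output, same O(n) cost (objective: alternative).


-- ===== PORT A =====
-- literal transliteration of A (on the char-list side; the String wrapper maps String.ofList over it)
def split_maintainer_names_chars (l : List Char) : List (List Char) :=
  if l = [] then []                        -- if not raw: return []
  else
    (PySem.Chars.splitOn l [',']).foldl    -- parts = raw.split(",")
      (fun names part =>
        (PySem.Chars.splitOn part [' ', 'a', 'n', 'd', ' ']).foldl   -- subparts = part.split(" and ")
          (fun ns nm =>
            let cleaned := PySem.Chars.strip nm                      -- cleaned = name.strip()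
            if cleaned ≠ [] then ns ++ [cleaned] else ns)            -- if cleaned: names.append(cleaned)
          names)
      []

def split_maintainer_names (raw : String) : List String :=
  (split_maintainer_names_chars raw.toList).map String.ofList

-- ===== PORT B =====
-- flush: name = "".join(buf).strip(); if name: names.append(name)
def pvFlush (buf : List Char) (names : List (List Char)) : List (List Char) :=
  let nm := PySem.Chars.strip buf
  if nm ≠ [] then names ++ [nm] else names

-- the while loop of Source B: one pass, buf is the current token, names the output so far
def pvScan : List Char → List Char → List (List Char) → List (List Char)
  | [], buf, names => pvFlush buf names
  | c :: t, buf, names =>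
    if c = ',' then pvScan t [] (pvFlush buf names)
    else if ([' ', 'a', 'n', 'd', ' '] : List Char).isPrefixOf (c :: t) then
      pvScan ((c :: t).drop 5) [] (pvFlush buf names)
    else pvScan t (buf ++ [c]) names
  termination_by l _ _ => l.length
  decreasing_by all_goals (simp; try omega)

def split_maintainer_names_alt (raw : String) : List String :=
  (pvScan raw.toList [] []).map String.ofList

-- ===== PRECONDITION & SPEC =====
def Spec_split_maintainer_names (raw : String) (out : List String) : Prop := out = split_maintainer_names_alt raw
instance (raw : String) (out : List String) : Decidable (Spec_split_maintainer_names raw out) := by unfold Spec_split_maintainer_names; infer_instance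

-- ===== CLAIM (what is proved, stated in full; the proofs are below) =====
def Claim_equal_split_maintainer_names : Prop := ∀ (raw : String), Dom_split_maintainer_names raw → Spec_split_maintainer_names raw (split_maintainer_names raw)

-- ===== LEMMAS AND PROOFS =====

-- prepend one char / a whole prefix to the first piece of a split
def consHead (c : Char) : List (List Char) → List (List Char)
  | [] => [[c]]
  | t :: ts => (c :: t) :: ts

def prependHead (p : List Char) : List (List Char) → List (List Char)
  | [] => [p]
  | t :: ts => (p ++ t) :: ts

-- clean (fuel-free) version of PySem.Chars.splitOn
def splitCl (sep : List Char) : List Char → List (List Char)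
  | [] => [[]]
  | c :: t =>
    if h : sep.isPrefixOf (c :: t) = true ∧ sep ≠ [] then
      [] :: splitCl sep ((c :: t).drop sep.length)
    else consHead c (splitCl sep t)
  termination_by l => l.length
  decreasing_by
    · have : 1 ≤ sep.length := List.length_pos_iff.mpr h.2
      simp; omega
    · simp

theorem consHead_ne_nil (c : Char) (ts : List (List Char)) : consHead c ts ≠ [] := by
  cases ts <;> simp [consHead]

theorem splitCl_ne_nil (sep : List Char) (l : List Char) : splitCl sep l ≠ [] := by
  cases l with
  | nil => simp [splitCl]
  | cons c t =>
    rw [splitCl]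
    split
    · simp
    · exact consHead_ne_nil _ _

theorem prependHead_nil (ts : List (List Char)) (h : ts ≠ []) : prependHead [] ts = ts := by
  cases ts with
  | nil => exact absurd rfl h
  | cons t ts => simp [prependHead]

theorem prependHead_snoc (x : List Char) (c : Char) (ts : List (List Char)) :
    prependHead (x ++ [c]) ts = prependHead x (consHead c ts) := by
  cases ts <;> simp [prependHead, consHead]

-- fuel elimination for PySem.Chars.splitOn.go
theorem goEq (sep : List Char) (hs : sep ≠ []) :
    ∀ (fuel : Nat) (l cur : List Char) (acc : List (List Char)), l.length < fuel →
      PySem.Chars.splitOn.go sep fuel l cur acc = acc.reverse ++ prependHead cur.reverse (splitCl sep l) := by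
  intro fuel
  induction fuel with
  | zero => intro l cur acc h; omega
  | succ fuel ih =>
    intro l cur acc h
    cases l with
    | nil =>
      rw [PySem.Chars.splitOn.go]
      · simp [splitCl, prependHead]
      · omega
    | cons c t =>
      rw [PySem.Chars.splitOn.go]
      rw [splitCl]
      split
      · rename_i hp
        rw [dif_pos ⟨hp, hs⟩]
        have hlen : 1 ≤ sep.length := List.length_pos_iff.mpr hs
        rw [ih _ _ _ (by simp at h ⊢; omega)]
        have hne := splitCl_ne_nil sep (List.drop sep.length (c :: t))
        cases hsp : splitCl sep (List.drop sep.length (c :: t)) with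
        | nil => exact absurd hsp hne
        | cons a as => simp [prependHead]
      · rename_i hp
        rw [dif_neg (by simp [hp])]
        rw [ih _ _ _ (by simp at h ⊢; omega)]
        simp [prependHead_snoc]

theorem splitOn_eq_splitCl (sep : List Char) (hs : sep ≠ []) (l : List Char) :
    PySem.Chars.splitOn l sep = splitCl sep l := by
  show PySem.Chars.splitOn.go sep (l.length + 1) l [] [] = _
  rw [goEq sep hs (l.length + 1) l [] [] (by omega)]
  simp [prependHead_nil _ (splitCl_ne_nil sep l)]

-- the two concrete separators
theorem splitComma_comma (t : List Char) : splitCl [','] (',' :: t) = [] :: splitCl [','] t := by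
  rw [splitCl]; simp [List.isPrefixOf]

theorem splitComma_cons (c : Char) (t : List Char) (hc : c ≠ ',') :
    splitCl [','] (c :: t) = consHead c (splitCl [','] t) := by
  rw [splitCl]
  rw [dif_neg]
  simp [List.isPrefixOf]
  intro h; exact absurd h.symm hc

theorem splitAnd_prefix (l : List Char) (hp : ([' ', 'a', 'n', 'd', ' '] : List Char).isPrefixOf l = true) :
    splitCl [' ', 'a', 'n', 'd', ' '] l = [] :: splitCl [' ', 'a', 'n', 'd', ' '] (l.drop 5) := by
  cases l with
  | nil => simp [List.isPrefixOf] at hp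
  | cons c t => rw [splitCl]; rw [dif_pos ⟨hp, by simp⟩]; norm_num

theorem splitAnd_cons (c : Char) (t : List Char)
    (hp : ([' ', 'a', 'n', 'd', ' '] : List Char).isPrefixOf (c :: t) = false) :
    splitCl [' ', 'a', 'n', 'd', ' '] (c :: t) = consHead c (splitCl [' ', 'a', 'n', 'd', ' '] t) := by
  rw [splitCl]; rw [dif_neg (by simp [hp])]

-- the head of a comma-split is a prefix of the input
theorem splitComma_head_prefix : ∀ (l : List Char) (h : List Char) (ts : List (List Char)),
    splitCl [','] l = h :: ts → h <+: l := by
  intro l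
  induction l with
  | nil => intro h ts he; simp [splitCl] at he; simp [he.1]
  | cons c t ih =>
    intro h ts he
    by_cases hc : c = ','
    · subst hc; rw [splitComma_comma] at he
      simp at he; simp [he.1]
    · rw [splitComma_cons c t hc] at he
      cases hsp : splitCl [','] t with
      | nil => exact absurd hsp (splitCl_ne_nil _ _)
      | cons a as =>
        rw [hsp] at he; simp [consHead] at he
        rcases he with ⟨he1, _⟩
        subst he1
        exact List.cons_prefix_cons.mpr ⟨rfl, ih a as hsp⟩

-- prepending the 5 chars of " and " to a comma-split
theorem splitComma_and5 (t : List Char) :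
    splitCl [','] (' ' :: 'a' :: 'n' :: 'd' :: ' ' :: t) = prependHead [' ', 'a', 'n', 'd', ' '] (splitCl [','] t) := by
  rw [splitComma_cons ' ' _ (by decide), splitComma_cons 'a' _ (by decide),
      splitComma_cons 'n' _ (by decide), splitComma_cons 'd' _ (by decide),
      splitComma_cons ' ' _ (by decide)]
  cases hsp : splitCl [','] t with
  | nil => exact absurd hsp (splitCl_ne_nil _ _)
  | cons a as => simp [consHead, prependHead]

-- B's fused two-delimiter split (proof-side model of the scan)
def fused : List Char → List (List Char)
  | [] => [[]]
  | c :: t =>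
    if c = ',' then [] :: fused t
    else if ([' ', 'a', 'n', 'd', ' '] : List Char).isPrefixOf (c :: t) then
      [] :: fused ((c :: t).drop 5)
    else consHead c (fused t)
  termination_by l => l.length
  decreasing_by all_goals (simp; try omega)

theorem fused_ne_nil (l : List Char) : fused l ≠ [] := by
  cases l with
  | nil => simp [fused]
  | cons c t =>
    rw [fused]
    split
    · simp
    · split
      · simp
      · exact consHead_ne_nil _ _

-- main structural lemma: comma-split then " and "-split = one fused split
theorem flatMap_splitCl_eq_fused : ∀ (l : List Char),
    (splitCl [','] l).flatMap (splitCl [' ', 'a', 'n', 'd', ' ']) = fused l := by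
  intro l
  induction hn : l.length using Nat.strong_induction_on generalizing l with
  | _ n ih =>
  subst hn
  cases l with
  | nil => simp [splitCl, fused]
  | cons c t =>
    by_cases hc : c = ','
    · subst hc
      rw [splitComma_comma, fused]
      rw [if_pos rfl]
      simp [splitCl]
      exact ih t.length (by simp) t rfl
    · by_cases hp : ([' ', 'a', 'n', 'd', ' '] : List Char).isPrefixOf (c :: t) = true
      · -- " and " is a prefix: c = ' ', t = 'a'::'n'::'d'::' '::t'
        have hshape : ∃ t', c :: t = ' ' :: 'a' :: 'n' :: 'd' :: ' ' :: t' := by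
          have hp2 : ([' ', 'a', 'n', 'd', ' '] : List Char) <+: (c :: t) := by
            simpa [← List.isPrefixOf_iff_prefix] using hp
          obtain ⟨s, hs⟩ := hp2
          exact ⟨s, by rw [← hs]; rfl⟩
        obtain ⟨t', ht'⟩ := hshape
        have hc' : c = ' ' := by injection ht'
        have ht : t = 'a' :: 'n' :: 'd' :: ' ' :: t' := by injection ht' with _ h2
        subst hc'; subst ht
        rw [fused]
        rw [if_neg hc, if_pos hp]
        rw [splitComma_and5]
        cases hsp : splitCl [','] t' with
        | nil => exact absurd hsp (splitCl_ne_nil _ _)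
        | cons a as =>
          simp only [prependHead, List.flatMap_cons]
          rw [splitAnd_prefix _ (by simp [List.isPrefixOf])]
          simp only [List.drop_succ_cons, List.drop_zero]
          have := ih t'.length (by simp; omega) t' rfl
          rw [hsp] at this
          simp only [List.flatMap_cons] at this
          simp [this]
      · -- ordinary character
        have hp' : ([' ', 'a', 'n', 'd', ' '] : List Char).isPrefixOf (c :: t) = false :=
          Bool.eq_false_iff.mpr hp
        rw [fused]
        rw [if_neg hc, if_neg (by simp [hp'])]
        rw [splitComma_cons c t hc]
        cases hsp : splitCl [','] t with
        | nil => exact absurd hsp (splitCl_ne_nil _ _)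
        | cons a as =>
          have ha : a <+: t := splitComma_head_prefix t a as hsp
          have hnp : ([' ', 'a', 'n', 'd', ' '] : List Char).isPrefixOf (c :: a) = false := by
            by_contra hcon
            have h1t : ([' ', 'a', 'n', 'd', ' '] : List Char).isPrefixOf (c :: a) = true := by
              cases hx : ([' ', 'a', 'n', 'd', ' '] : List Char).isPrefixOf (c :: a) with
              | false => exact absurd hx hcon
              | true => rfl
            have h1 : ([' ', 'a', 'n', 'd', ' '] : List Char) <+: (c :: a) := by
              simpa [← List.isPrefixOf_iff_prefix] using h1t
            have h2 : (c :: a) <+: (c :: t) := List.cons_prefix_cons.mpr ⟨rfl, ha⟩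
            have h3 : ([' ', 'a', 'n', 'd', ' '] : List Char).isPrefixOf (c :: t) = true := by
              simpa [List.isPrefixOf_iff_prefix] using h1.trans h2
            rw [h3] at hp'
            exact absurd hp' (by simp)
          simp only [consHead, List.flatMap_cons]
          rw [splitAnd_cons c a hnp]
          have hIH := ih t.length (by simp) t rfl
          rw [hsp] at hIH
          simp only [List.flatMap_cons] at hIH
          rw [← hIH]
          cases hsa : splitCl [' ', 'a', 'n', 'd', ' '] a with
          | nil => exact absurd hsa (splitCl_ne_nil _ _)
          | cons a0 as0 => simp [consHead]

-- emit: strip each token, keep the non-empty ones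
def emit (ts : List (List Char)) : List (List Char) :=
  ts.filterMap (fun x => if PySem.Chars.strip x ≠ [] then some (PySem.Chars.strip x) else none)

theorem emit_append (xs ys : List (List Char)) : emit (xs ++ ys) = emit xs ++ emit ys := by
  simp [emit]

-- A's inner fold over the subparts of one part
theorem innerFold_eq (subparts : List (List Char)) : ∀ (ns : List (List Char)),
    subparts.foldl
      (fun ns nm =>
        let cleaned := PySem.Chars.strip nm
        if cleaned ≠ [] then ns ++ [cleaned] else ns) ns = ns ++ emit subparts := by
  induction subparts with
  | nil => intro ns; simp [emit]
  | cons x xs ih =>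
    intro ns
    simp only [List.foldl_cons]
    rw [ih]
    by_cases hx : PySem.Chars.strip x = []
    · simp [emit, hx]
    · simp [emit, hx]

-- A's outer fold over the comma parts
theorem outerFold_eq (parts : List (List Char)) : ∀ (names : List (List Char)),
    parts.foldl
      (fun names part =>
        (splitCl [' ', 'a', 'n', 'd', ' '] part).foldl
          (fun ns nm =>
            let cleaned := PySem.Chars.strip nm
            if cleaned ≠ [] then ns ++ [cleaned] else ns)
          names) names
      = names ++ emit (parts.flatMap (splitCl [' ', 'a', 'n', 'd', ' '])) := by
  induction parts with
  | nil => intro names; simp [emit]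
  | cons p ps ih =>
    intro names
    simp only [List.foldl_cons, List.flatMap_cons]
    rw [innerFold_eq, ih, emit_append, List.append_assoc]

-- B's scan in terms of the fused split
theorem pvScan_eq : ∀ (l buf : List Char) (names : List (List Char)),
    pvScan l buf names = names ++ emit (prependHead buf (fused l)) := by
  intro l
  induction hn : l.length using Nat.strong_induction_on generalizing l with
  | _ n ih =>
  subst hn
  cases l with
  | nil =>
    intro buf names
    rw [pvScan, fused]
    simp only [prependHead, List.append_nil]
    by_cases hb : PySem.Chars.strip buf = [] <;> simp [pvFlush, emit, hb]
  | cons c t =>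
    intro buf names
    rw [pvScan, fused]
    by_cases hc : c = ','
    · rw [if_pos hc, if_pos hc]
      rw [ih t.length (by simp) t rfl]
      rw [prependHead_nil _ (fused_ne_nil t)]
      have : prependHead buf ([] :: fused t) = buf :: fused t := by simp [prependHead]
      rw [this]
      have : emit (buf :: fused t) = emit [buf] ++ emit (fused t) := by
        simpa using emit_append [buf] (fused t)
      rw [this]
      by_cases hb : PySem.Chars.strip buf = [] <;> simp [pvFlush, emit, hb]
    · rw [if_neg hc, if_neg hc]
      by_cases hp : ([' ', 'a', 'n', 'd', ' '] : List Char).isPrefixOf (c :: t) = true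
      · rw [if_pos hp, if_pos hp]
        rw [ih ((c :: t).drop 5).length (by simp; try omega) _ rfl]
        rw [prependHead_nil _ (fused_ne_nil _)]
        have : prependHead buf ([] :: fused ((c :: t).drop 5)) = buf :: fused ((c :: t).drop 5) := by
          simp [prependHead]
        rw [this]
        have he : emit (buf :: fused ((c :: t).drop 5)) = emit [buf] ++ emit (fused ((c :: t).drop 5)) := by
          simpa using emit_append [buf] (fused ((c :: t).drop 5))
        rw [he]
        by_cases hb : PySem.Chars.strip buf = [] <;> simp [pvFlush, emit, hb]
      · rw [if_neg hp, if_neg hp]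
        rw [ih t.length (by simp) t rfl]
        rw [prependHead_snoc]

theorem split_maintainer_names_chars_eq (l : List Char) :
    split_maintainer_names_chars l = pvScan l [] [] := by
  rw [split_maintainer_names_chars, pvScan_eq]
  rw [prependHead_nil _ (fused_ne_nil l)]
  by_cases hl : l = []
  · subst hl; simp [fused, emit, PySem.Chars.strip, PySem.Chars.lstrip, PySem.Chars.rstrip]
  · rw [if_neg hl]
    rw [splitOn_eq_splitCl [','] (by simp) l]
    simp only [splitOn_eq_splitCl [' ', 'a', 'n', 'd', ' '] (by simp)]
    rw [outerFold_eq]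
    rw [flatMap_splitCl_eq_fused]

-- ===== VERDICT (by name: the statement is the Claim_ definition above) =====
theorem split_maintainer_names_spec : Claim_equal_split_maintainer_names := by
  intro raw _
  unfold Spec_split_maintainer_names split_maintainer_names split_maintainer_names_alt
  rw [split_maintainer_names_chars_eq]
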